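-- pv_equiv track=rewrite | github.com/mateuszbuda/PyClone | priors.py | TCNPrior
-- ===== SOURCE A (Python) =====
-- def TCNPrior(normal_cn, minor_cn, major_cn):
--   """ TCNPrior
--   Assumes that g_n = AA, c(g_v) = total_cn and b(g_v) is an element of {1,...,total_cn}.
--   The genotype of the variant population has the predicted copy number and at least one
--   variant allele.
--
--   This means that g_v has the length total_cn and g_v consists of 0 or (total_cn - 1)
--   'A' and 1 to total_cn 'B'. Thus if the total copy number was 4, the possible genotypes
--   for g_v would be AAAB, AABB, ABBB, BBBB;
--
--   Also assumes with equal probability that g_r = AA or c(g_r) = total_cn and b(g_r) = 0.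
--   The genotype of the variant population at the locus has the predicted total copy number
--   and we consider the possibility that any number of copies (> 0) of the locus contains the
--   mutant allele.
--
--   This means that g_r are either 'AA' or 'A' * total_cn with equal probability.
--
--   ------------------------------------------------------------
--   Input   : normal_cn - copy number of the mutant locus for the normal cells in the sample.
--             minor_cn  - minor parental copy number predicted from the tumour sample.
--             major_cn  - major parental copy number predicted from the tumour sample.
--   Output  : ("AA", "AA", g_v) - (g_n, g_r, g_v)
--           : Prior weight
--   """
--   total_cn = minor_cn + major_cn
--   g_n = ["A" * normal_cn] * 2 * total_cn
--   g_r = ["AA", "A" * total_cn] * total_cn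
--   g_v = []
--   prior_weight = [1] * 2 * total_cn
--
--   for i in range(1, total_cn + 1):
--     genotype = "A" * (total_cn - i) + "B" * i
--     g_v.append(genotype)
--     g_v.append(genotype)
--
--   states = zip(g_n, g_r, g_v, prior_weight)
--
--   return states
-- ===== SOURCE B (Python) =====
-- def TCNPrior(normal_cn, minor_cn, major_cn):
--     # Single generator loop instead of four parallel lists + zip; yields the
--     # identical tuple sequence (a single-use iterator, like A's zip object).
--     total_cn = minor_cn + major_cn
--     g_n = "A" * normal_cn
--     ref = "A" * total_cn
--
--     def gen():
--         for i in range(1, total_cn + 1):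
--             gv = "A" * (total_cn - i) + "B" * i
--             yield (g_n, "AA", gv, 1)
--             yield (g_n, ref, gv, 1)
--
--     return gen()
-- ===== Notes on version B (the rewrite author's own statement) =====
-- stated objective: simpler
-- what changed: Replaces the four parallel lists (built with list-repetition and an append loop) and the final zip by a single generator loop that yields the two tuples for each i directly, computing the shared strings once.
import Mathlib
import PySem

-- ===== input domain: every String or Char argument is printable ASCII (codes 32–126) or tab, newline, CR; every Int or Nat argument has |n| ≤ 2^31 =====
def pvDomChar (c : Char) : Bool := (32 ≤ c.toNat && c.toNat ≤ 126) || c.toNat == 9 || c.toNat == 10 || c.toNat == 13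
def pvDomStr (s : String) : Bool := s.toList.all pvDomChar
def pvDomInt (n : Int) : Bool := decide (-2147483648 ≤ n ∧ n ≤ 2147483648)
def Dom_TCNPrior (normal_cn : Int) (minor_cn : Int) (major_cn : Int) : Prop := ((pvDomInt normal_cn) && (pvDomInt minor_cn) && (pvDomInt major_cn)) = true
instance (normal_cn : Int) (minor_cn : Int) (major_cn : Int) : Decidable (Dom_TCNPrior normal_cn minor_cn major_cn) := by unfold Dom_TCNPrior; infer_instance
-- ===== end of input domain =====

-- B replaces the four parallel lists + zip by one generator-style loop yielding
-- both tuples per i directly (objective: simpler). Equivalence is about the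
-- yielded tuple sequence (A returns a zip object, B a generator; both iterate
-- to the same list of 4-tuples).

-- "A" * n exactly as in Python: negative n gives the empty string
def pvRepA (n : Int) : String := String.ofList (List.replicate n.toNat 'A')

-- "A" * (t - i) + "B" * i, exact hand port of Python string repeat/concat
def pvGeno (t i : Int) : String :=
  String.ofList (List.replicate (t - i).toNat 'A' ++ List.replicate i.toNat 'B')

-- ===== PORT A =====
def TCNPrior (normal_cn : Int) (minor_cn : Int) (major_cn : Int) : List (String × String × String × Int) :=
  let total_cn := minor_cn + major_cn
  let g_n := PySem.List.pyRepeat (PySem.List.pyRepeat [pvRepA normal_cn] 2) total_cn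
  let g_r := PySem.List.pyRepeat ["AA", pvRepA total_cn] total_cn
  let g_v := (PySem.List.pyRange 1 (total_cn + 1) 1).foldl
      (fun acc i => (acc ++ [pvGeno total_cn i]) ++ [pvGeno total_cn i]) []
  let prior_weight := PySem.List.pyRepeat (PySem.List.pyRepeat [(1 : Int)] 2) total_cn
  g_n.zip (g_r.zip (g_v.zip prior_weight))

-- ===== PORT B =====
def TCNPrior_alt (normal_cn : Int) (minor_cn : Int) (major_cn : Int) : List (String × String × String × Int) :=
  let total_cn := minor_cn + major_cn
  let g_n := pvRepA normal_cn
  let ref := pvRepA total_cn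
  (PySem.List.pyRange 1 (total_cn + 1) 1).flatMap (fun i =>
    let gv := pvGeno total_cn i
    [(g_n, "AA", gv, 1), (g_n, ref, gv, 1)])

-- ===== PRECONDITION & SPEC =====
def Spec_TCNPrior (normal_cn : Int) (minor_cn : Int) (major_cn : Int) (out : List (String × String × String × Int)) : Prop := out = TCNPrior_alt normal_cn minor_cn major_cn
instance (normal_cn : Int) (minor_cn : Int) (major_cn : Int) (out : List (String × String × String × Int)) : Decidable (Spec_TCNPrior normal_cn minor_cn major_cn out) := by unfold Spec_TCNPrior; infer_instance

-- ===== CLAIM (what is proved, stated in full; the proofs are below) =====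
def Claim_equal_TCNPrior : Prop := ∀ (normal_cn : Int) (minor_cn : Int) (major_cn : Int), Dom_TCNPrior normal_cn minor_cn major_cn → Spec_TCNPrior normal_cn minor_cn major_cn (TCNPrior normal_cn minor_cn major_cn)

-- ===== LEMMAS AND PROOFS =====

-- the g_v append loop builds exactly the doubled flatMap
theorem pv_gv_foldl (f : Int → String) (L : List Int) (acc : List String) :
    L.foldl (fun acc i => (acc ++ [f i]) ++ [f i]) acc
      = acc ++ L.flatMap (fun i => [f i, f i]) := by
  induction L generalizing acc with
  | nil => simp
  | cons x t ih => simp [List.foldl_cons, List.flatMap]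

-- zip of the doubled constant lists with the doubled flatMap collapses to B's flatMap
theorem pv_zip4 (gn aT : String) (f : Int → String) (L : List Int) :
    ((List.replicate L.length [gn, gn]).flatten).zip
        (((List.replicate L.length ["AA", aT]).flatten).zip
          ((L.flatMap (fun i => [f i, f i])).zip
            ((List.replicate L.length [(1 : Int), 1]).flatten)))
      = L.flatMap (fun i => [(gn, "AA", f i, 1), (gn, aT, f i, 1)]) := by
  induction L with
  | nil => simp
  | cons x t ih => simp [List.replicate_succ, ih]

theorem TCNPrior_eq (normal_cn minor_cn major_cn : Int) :
    TCNPrior normal_cn minor_cn major_cn = TCNPrior_alt normal_cn minor_cn major_cn := by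
  show
      (PySem.List.pyRepeat (PySem.List.pyRepeat [pvRepA normal_cn] 2) (minor_cn + major_cn)).zip
        ((PySem.List.pyRepeat ["AA", pvRepA (minor_cn + major_cn)] (minor_cn + major_cn)).zip
          (((PySem.List.pyRange 1 (minor_cn + major_cn + 1) 1).foldl
              (fun acc i => (acc ++ [pvGeno (minor_cn + major_cn) i]) ++ [pvGeno (minor_cn + major_cn) i]) []).zip
            (PySem.List.pyRepeat (PySem.List.pyRepeat [(1 : Int)] 2) (minor_cn + major_cn))))
      = (PySem.List.pyRange 1 (minor_cn + major_cn + 1) 1).flatMap (fun i =>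
          [(pvRepA normal_cn, "AA", pvGeno (minor_cn + major_cn) i, 1),
           (pvRepA normal_cn, pvRepA (minor_cn + major_cn), pvGeno (minor_cn + major_cn) i, 1)])
  set t := minor_cn + major_cn with ht
  rw [pv_gv_foldl]
  simp only [List.nil_append]
  have hrep2 : PySem.List.pyRepeat [pvRepA normal_cn] 2 = [pvRepA normal_cn, pvRepA normal_cn] := by
    simp [PySem.List.pyRepeat, List.replicate_succ]
  have hrep1 : PySem.List.pyRepeat [(1 : Int)] 2 = [(1 : Int), 1] := by
    simp [PySem.List.pyRepeat, List.replicate_succ]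
  rw [hrep2, hrep1]
  have hlen : (PySem.List.pyRange 1 (t + 1) 1).length = t.toNat := by
    simpa using PySem.List.length_pyRange_one 1 (t + 1)
  have := pv_zip4 (pvRepA normal_cn) (pvRepA t) (fun i => pvGeno t i)
      (PySem.List.pyRange 1 (t + 1) 1)
  rw [hlen] at this
  simp [PySem.List.pyRepeat] at this ⊢; exact this

-- ===== VERDICT (by name: the statement is the Claim_ definition above) =====
theorem TCNPrior_spec : Claim_equal_TCNPrior := by
  intro n mi ma _
  exact TCNPrior_eq n mi ma
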